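-- pv_equiv track=rewrite | github.com/Delaurensbot/BrabantRoyale | Royale_api.py | render_battles_left_today
-- ===== SOURCE A (Python) =====
-- from typing import Dict, List, Optional, Set, Tuple
--
-- def attacks_left_today(row: Dict) -> Optional[int]:
--     try:
--         used = int(row.get("decks_used_today", 0))
--     except Exception:
--         return None
--     left = 4 - used
--     if left < 0:
--         left = 0
--     if left > 4:
--         left = 4
--     return left
--
-- def bucket_open_players(rows: List[Dict]) -> Dict[int, List[str]]:
--     buckets: Dict[int, List[str]] = {4: [], 3: [], 2: [], 1: [], 0: []}
--     for r in rows: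
--         left = attacks_left_today(r)
--         if left is None:
--             continue
--         name = (r.get("name") or "").strip()
--         if not name:
--             continue
--         buckets[left].append(name)
--     return buckets
--
-- def render_battles_left_today(rows: List[Dict]) -> str:
--     buckets = bucket_open_players(rows)
--     out: List[str] = []
--     out.append("Battles left (today):")
--
--     any_added = False
--     for k in [4, 3, 2, 1]:
--         names = buckets.get(k, [])
--         if not names:
--             continue
--         any_added = True
--         out.append("")
--         out.append(f"{k} attack{'s' if k != 1 else ''} left:")
--         for n in names:
--             out.append(f"- {n}")
--
--     if not any_added:
--         out.append("")
--         out.append("Iedereen is klaar voor vandaag.")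
--     return "\n".join(out)
-- ===== SOURCE B (Python) =====
-- def render_battles_left_today(rows):
--     def names_with(k):
--         res = []
--         for r in rows:
--             try:
--                 used = int(r.get("decks_used_today", 0))
--             except Exception:
--                 continue
--             if max(0, min(4, 4 - used)) != k:
--                 continue
--             name = (r.get("name") or "").strip()
--             if name:
--                 res.append(name)
--         return res
--     sections = [(k, names_with(k)) for k in (4, 3, 2, 1)]
--     body = [
--         line
--         for k, names in sections if names
--         for line in ["", (f"{k} attack left:" if k == 1 else f"{k} attacks left:")] + [f"- {n}" for n in names]
--     ]
--     lines = ["Battles left (today):"] + (body if body else ["", "Iedereen is klaar voor vandaag."])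
--     return "\n".join(lines)
-- ===== Notes on version B (the rewrite author's own statement) =====
-- stated objective: simpler
-- what changed: B drops the dict-of-lists bucketing stage and the any_added flag: it scans the rows once per count k in (4,3,2,1) collecting the matching names directly, then assembles the output with comprehensions.
import Mathlib
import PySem

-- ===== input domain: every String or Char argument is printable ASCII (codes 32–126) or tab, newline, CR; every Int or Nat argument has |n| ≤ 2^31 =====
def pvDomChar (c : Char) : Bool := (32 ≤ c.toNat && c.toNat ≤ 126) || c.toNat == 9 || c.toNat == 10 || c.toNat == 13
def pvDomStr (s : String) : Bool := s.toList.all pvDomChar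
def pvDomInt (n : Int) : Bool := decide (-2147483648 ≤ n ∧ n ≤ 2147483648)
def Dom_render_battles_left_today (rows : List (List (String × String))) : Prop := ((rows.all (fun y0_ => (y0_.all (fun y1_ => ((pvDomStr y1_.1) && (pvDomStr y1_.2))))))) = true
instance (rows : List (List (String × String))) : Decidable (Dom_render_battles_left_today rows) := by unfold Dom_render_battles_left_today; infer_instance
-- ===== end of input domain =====

-- B drops the dict-of-lists bucketing stage and the any_added flag: one scan of the rows per
-- count k in (4,3,2,1) collects the matching names directly; same output, same O(n) cost.

-- ===== PORT A =====
def attacksLeftTodayA (row : List (String × String)) : Option Int :=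
  -- try: used = int(row.get("decks_used_today", 0)); except: return None
  let usedO : Option Int :=
    match PySem.Dict.get? (PySem.Dict.mk row) "decks_used_today" with
    | none => some 0
    | some s => PySem.Int.ofStr? s
  match usedO with
  | none => none
  | some used =>
    let left := 4 - used
    let left := if left < 0 then 0 else left
    let left := if left > 4 then 4 else left
    some left

def nameOfA (row : List (String × String)) : String :=
  PySem.Str.strip ((PySem.Dict.get? (PySem.Dict.mk row) "name").getD "")

def bucketOpenPlayersA (rows : List (List (String × String))) : PySem.Dict Int (List String) :=
  rows.foldl
    (fun b r =>
      match attacksLeftTodayA r with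
      | none => b
      | some left =>
        let name := nameOfA r
        if name = "" then b else b.modify left [] (· ++ [name]))
    (PySem.Dict.mk [(4, []), (3, []), (2, []), (1, []), (0, [])])

def headerA (k : Int) : String :=
  PySem.Int.toStr k ++ " attack" ++ (if k ≠ 1 then "s" else "") ++ " left:"

def render_battles_left_today (rows : List (List (String × String))) : String :=
  let buckets := bucketOpenPlayersA rows
  let st :=
    ([4, 3, 2, 1] : List Int).foldl
      (fun (p : List String × Bool) k =>
        let names := buckets.getD k []
        if names = [] then p
        else (p.1 ++ [""] ++ [headerA k] ++ names.map (fun n => "- " ++ n), true))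
      (["Battles left (today):"], false)
  let out := if st.2 then st.1 else st.1 ++ ["", "Iedereen is klaar voor vandaag."]
  PySem.Str.join "\n" out

-- ===== PORT B =====
def namesWithB (rows : List (List (String × String))) (k : Int) : List String :=
  rows.filterMap (fun r =>
    match (match PySem.Dict.get? (PySem.Dict.mk r) "decks_used_today" with
           | none => some 0
           | some s => PySem.Int.ofStr? s) with
    | none => none
    | some used =>
      if max 0 (min 4 (4 - used)) ≠ k then none
      else
        let name := PySem.Str.strip ((PySem.Dict.get? (PySem.Dict.mk r) "name").getD "")
        if name = "" then none else some name)

def headerB (k : Int) : String :=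
  if k = 1 then PySem.Int.toStr k ++ " attack left:" else PySem.Int.toStr k ++ " attacks left:"

def render_battles_left_today_alt (rows : List (List (String × String))) : String :=
  let sections := ([4, 3, 2, 1] : List Int).map (fun k => (k, namesWithB rows k))
  let body :=
    (sections.filter (fun p => p.2 ≠ [])).flatMap
      (fun p => ["", headerB p.1] ++ p.2.map (fun n => "- " ++ n))
  PySem.Str.join "\n" ("Battles left (today):" :: (if body = [] then ["", "Iedereen is klaar voor vandaag."] else body))

-- ===== PRECONDITION & SPEC =====
def Spec_render_battles_left_today (rows : List (List (String × String))) (out : String) : Prop := out = render_battles_left_today_alt rows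
instance (rows : List (List (String × String))) (out : String) : Decidable (Spec_render_battles_left_today rows out) := by unfold Spec_render_battles_left_today; infer_instance

-- ===== CLAIM (what is proved, stated in full; the proofs are below) =====
def Claim_equal_render_battles_left_today : Prop := ∀ (rows : List (List (String × String))), Dom_render_battles_left_today rows → Spec_render_battles_left_today rows (render_battles_left_today rows)

-- ===== LEMMAS AND PROOFS =====

-- The (left, name) pairs A actually buckets, in row order.
def pairsOf (rows : List (List (String × String))) : List (Int × String) :=
  rows.filterMap (fun r =>
    match attacksLeftTodayA r with
    | none => none
    | some left =>
      let name := nameOfA r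
      if name = "" then none else some (left, name))

lemma bucket_foldl_pairs (rows : List (List (String × String))) (d : PySem.Dict Int (List String)) :
    rows.foldl
      (fun b r =>
        match attacksLeftTodayA r with
        | none => b
        | some left =>
          let name := nameOfA r
          if name = "" then b else b.modify left [] (· ++ [name]))
      d
    = (pairsOf rows).foldl (fun b p => b.modify p.1 [] (· ++ [p.2])) d := by
  induction rows generalizing d with
  | nil => rfl
  | cons r rs ih =>
    simp only [pairsOf, List.filterMap_cons, List.foldl_cons]
    cases h : attacksLeftTodayA r with
    | none => simpa [pairsOf, h] using ih d
    | some left =>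
      by_cases hn : nameOfA r = "" <;>
        simp [hn, List.foldl_cons] <;> exact ih _

lemma getD_init (k : Int) :
    (PySem.Dict.mk [((4:Int), ([]:List String)), (3, []), (2, []), (1, []), (0, [])]).getD k [] = [] := by
  simp only [PySem.Dict.getD_eq_get?_getD, PySem.Dict.get?_mk_cons]
  split_ifs <;> rfl

lemma bucket_getD (rows : List (List (String × String))) (k : Int) :
    (bucketOpenPlayersA rows).getD k [] = ((pairsOf rows).filter (fun p => p.1 == k)).map (·.2) := by
  unfold bucketOpenPlayersA
  rw [bucket_foldl_pairs, PySem.Dict.getD_foldl_modify_append, getD_init, List.nil_append]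

lemma row_clamp (u : Int) :
    (if (if (4 - u) < 0 then 0 else 4 - u) > 4 then 4 else (if (4 - u) < 0 then 0 else 4 - u))
      = max 0 (min 4 (4 - u)) := by omega

lemma filter_pairs_eq_namesWith (rows : List (List (String × String))) (k : Int) :
    ((pairsOf rows).filter (fun p => p.1 == k)).map (·.2) = namesWithB rows k := by
  unfold pairsOf namesWithB
  rw [List.filter_filterMap, List.map_filterMap]
  apply List.filterMap_congr
  intro r _
  have hname : PySem.Str.strip (((PySem.Dict.mk r).get? "name").getD "") = nameOfA r := rfl
  cases hg : PySem.Dict.get? (PySem.Dict.mk r) "decks_used_today" with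
  | none =>
    have hcl := row_clamp 0
    simp only [attacksLeftTodayA, hg, hname, hcl]
    by_cases hn : nameOfA r = ""
    · simp [hn]
    · simp [Option.filter, hn]
  | some s =>
    cases ho : PySem.Int.ofStr? s with
    | none => simp [attacksLeftTodayA, hg, ho]
    | some u =>
      have hcl := row_clamp u
      simp only [attacksLeftTodayA, hg, ho, hname, hcl]
      by_cases hn : nameOfA r = ""
      · simp [hn]
      · by_cases hk : max 0 (min 4 (4 - u)) = k
        · simp [Option.filter, hn, hk]
        · simp [Option.filter, hn, hk]

-- ===== VERDICT (by name: the statement is the Claim_ definition above) =====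
theorem render_battles_left_today_spec : Claim_equal_render_battles_left_today := by
  intro rows _
  show render_battles_left_today rows = render_battles_left_today_alt rows
  unfold render_battles_left_today render_battles_left_today_alt
  have h4 := (bucket_getD rows 4).trans (filter_pairs_eq_namesWith rows 4)
  have h3 := (bucket_getD rows 3).trans (filter_pairs_eq_namesWith rows 3)
  have h2 := (bucket_getD rows 2).trans (filter_pairs_eq_namesWith rows 2)
  have h1 := (bucket_getD rows 1).trans (filter_pairs_eq_namesWith rows 1)
  simp only [List.foldl_cons, List.foldl_nil, List.map_cons, List.map_nil,
    List.filter_cons, List.filter_nil,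
    h4, h3, h2, h1]
  have g4 : headerB 4 = headerA 4 := rfl
  have g3 : headerB 3 = headerA 3 := rfl
  have g2 : headerB 2 = headerA 2 := rfl
  have g1 : headerB 1 = headerA 1 := rfl
  by_cases e4 : namesWithB rows 4 = [] <;>
  by_cases e3 : namesWithB rows 3 = [] <;>
  by_cases e2 : namesWithB rows 2 = [] <;>
  by_cases e1 : namesWithB rows 1 = [] <;>
    simp [e4, e3, e2, e1, g4, g3, g2, g1]
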